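-- pv_equiv track=rewrite | github.com/PittYHL/Elastic_MBQC | elastic.py | find_back_order
-- ===== SOURCE A (Python) =====
-- def find_back_order(back_loc, rows):
--     y_loc = []
--     front_or = []
--     for loc in back_loc:
--         if loc[1] not in y_loc:
--             y_loc.append(loc[1])
--     y_loc.sort(reverse=True)
--     for y in y_loc:
--         found = []
--         for i in range(len(back_loc)):
--             if back_loc[i][1] == y:
--                 found.append(back_loc[i])
--         if len(found) == 1:
--             front_or.insert(0, back_loc.index(found[0]))
--         else:
--             x_loc = []
--             for loc in found:
--                 x_loc.append(loc[0])
--             up = min(x_loc)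
--             down = rows - max(x_loc) - 1
--             if up > down:
--                 x_loc.sort(reverse=True)
--                 for x in x_loc:
--                     for loc in found:
--                         if loc[0] == x:
--                             front_or.append(back_loc.index(loc))
--                             break
--             else:
--                 x_loc.sort()
--                 for x in x_loc:
--                     for loc in found:
--                         if loc[0] == x:
--                             front_or.insert(0, back_loc.index(loc))
--                             break
--     return front_or
-- ===== SOURCE B (Python) =====
-- def find_back_order(back_loc, rows):
--     # one grouping pass: y -> list of x's (in order, with duplicates), (x, y) -> first index
--     xs_by_y = {}
--     first = {}
--     for i, (x, y) in enumerate(back_loc):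
--         xs_by_y.setdefault(y, []).append(x)
--         first.setdefault((x, y), i)
--
--     # recursive sandwich over the ascending y's: a "front" group's block is prepended
--     # before everything deeper, a "back" group's block appended after it; every block
--     # is the group's indices in descending-x order.
--     def build(ys):
--         if not ys:
--             return []
--         y, rest = ys[0], ys[1:]
--         xs = xs_by_y[y]
--         block = [first[(x, y)] for x in sorted(xs, reverse=True)]
--         if len(xs) == 1 or min(xs) <= rows - max(xs) - 1:
--             return block + build(rest)
--         return build(rest) + block
--
--     return build(sorted(xs_by_y))
-- ===== Notes on version B (the rewrite author's own statement) =====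
-- stated objective: faster
-- what changed: B replaces A's descending-y outer loop with per-y whole-list rescans, branch-dependent sort directions and insert(0)/append simulation by one grouping pass (y->x-list and (x,y)->first-index dicts) plus a recursive sandwich over the ascending y keys: every group's block is its indices in one uniform descending-x order, prepended before the rest for front groups and appended after it for back groups.
import Mathlib
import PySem

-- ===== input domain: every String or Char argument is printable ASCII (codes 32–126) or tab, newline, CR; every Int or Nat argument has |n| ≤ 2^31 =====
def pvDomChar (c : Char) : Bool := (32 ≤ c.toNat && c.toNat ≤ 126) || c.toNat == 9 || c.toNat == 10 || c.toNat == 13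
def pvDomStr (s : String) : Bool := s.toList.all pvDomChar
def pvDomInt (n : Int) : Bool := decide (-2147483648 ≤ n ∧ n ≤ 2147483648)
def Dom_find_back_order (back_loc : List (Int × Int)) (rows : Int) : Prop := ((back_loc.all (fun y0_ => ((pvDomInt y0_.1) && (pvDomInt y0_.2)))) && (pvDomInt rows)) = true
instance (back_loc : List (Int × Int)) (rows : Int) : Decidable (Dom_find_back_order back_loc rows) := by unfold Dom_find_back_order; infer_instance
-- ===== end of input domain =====

-- B replaces A's descending-y loop with per-y rescans, branch-dependent sort directions and
-- insert(0)/append simulation by one grouping pass plus a recursive sandwich over the ascending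
-- y keys (uniform descending-x blocks, prepended or appended); objective: faster.

-- ===== PORT A =====
-- back_loc.index(v) as A uses it: the element is always present, so the ValueError branch
-- (index? = none) is unreachable; the .getD 0 default is never taken.
def pyIndexI (xs : List (Int × Int)) (v : Int × Int) : Int :=
  ((PySem.List.index? xs v).getD 0 : Nat)

def find_back_order (back_loc : List (Int × Int)) (rows : Int) : List Int :=
  -- y_loc built by 'if loc[1] not in y_loc: y_loc.append(loc[1])' (a hand-rolled set = PySem.Set.add)
  let y_loc : PySem.Set Int := back_loc.foldl (fun s loc => PySem.Set.add s loc.2) PySem.Set.empty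
  let y_sorted := PySem.List.sorted y_loc (fun y => y) true
  y_sorted.foldl (fun front_or y =>
    let found : List (Int × Int) :=
      (PySem.List.pyRange 0 (back_loc.length : Int) 1).foldl
        (fun f i => if (PySem.List.pyGetD back_loc i (0, 0)).2 == y
                    then f ++ [PySem.List.pyGetD back_loc i (0, 0)] else f) []
    if found.length == 1 then
      PySem.List.insert front_or 0 (pyIndexI back_loc (PySem.List.pyGetD found 0 (0, 0)))
    else
      let x_loc := found.foldl (fun a loc => a ++ [loc.1]) []
      -- min/max of x_loc: found is nonempty in this branch, so the .getD 0 default is never taken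
      let up := (PySem.List.min? x_loc (fun x => x)).getD 0
      let down := rows - (PySem.List.max? x_loc (fun x => x)).getD 0 - 1
      if up > down then
        (PySem.List.sorted x_loc (fun x => x) true).foldl (fun acc x =>
          -- 'for loc in found: if loc[0] == x: …; break' = first match
          match found.find? (fun loc => loc.1 == x) with
          | some loc => acc ++ [pyIndexI back_loc loc]
          | none => acc) front_or
      else
        (PySem.List.sorted x_loc (fun x => x) false).foldl (fun acc x =>
          match found.find? (fun loc => loc.1 == x) with
          | some loc => PySem.List.insert acc 0 (pyIndexI back_loc loc)
          | none => acc) front_or) []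

-- ===== PORT B =====
-- B's recursive 'build(ys)' over the ascending list of distinct y's: a front group's block
-- (indices in descending-x order) goes before everything deeper, a back group's block after it.
def fbo_build (groups : PySem.Dict Int (List Int)) (first : PySem.Dict (Int × Int) Int)
    (rows : Int) : List Int → List Int
  | [] => []
  | y :: rest =>
    let xs := groups.getD y []
    -- first[(x, y)]: the key is always present, so the .getD 0 default is never taken;
    -- min/max: xs is nonempty for every y in the dict, so the .getD 0 default is never taken
    let block := (PySem.List.sorted xs (fun x => x) true).map (fun x => first.getD (x, y) 0)
    if xs.length == 1 ||
        decide ((PySem.List.min? xs (fun x => x)).getD 0 ≤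
                rows - (PySem.List.max? xs (fun x => x)).getD 0 - 1) then
      block ++ fbo_build groups first rows rest
    else
      fbo_build groups first rows rest ++ block

def find_back_order_alt (back_loc : List (Int × Int)) (rows : Int) : List Int :=
  let st := (PySem.List.enumerate back_loc 0).foldl
    (fun (st : PySem.Dict Int (List Int) × PySem.Dict (Int × Int) Int) p =>
      -- xs_by_y.setdefault(y, []).append(x); first.setdefault((x, y), i)
      (st.1.modify p.2.2 [] (· ++ [p.2.1]), st.2.setdefault p.2 p.1))
    (PySem.Dict.empty, PySem.Dict.empty)
  fbo_build st.1 st.2 rows (PySem.List.sorted st.1.keys (fun y => y) false)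

-- ===== PRECONDITION & SPEC =====
def Spec_find_back_order (back_loc : List (Int × Int)) (rows : Int) (out : List Int) : Prop := out = find_back_order_alt back_loc rows
instance (back_loc : List (Int × Int)) (rows : Int) (out : List Int) : Decidable (Spec_find_back_order back_loc rows out) := by unfold Spec_find_back_order; infer_instance

-- ===== CLAIM (what is proved, stated in full; the proofs are below) =====
def Claim_equal_find_back_order : Prop := ∀ (back_loc : List (Int × Int)) (rows : Int), Dom_find_back_order back_loc rows → Spec_find_back_order back_loc rows (find_back_order back_loc rows)

-- ===== LEMMAS AND PROOFS =====

-- the y-group of back_loc: A's 'found' list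
def foundOf (bl : List (Int × Int)) (y : Int) : List (Int × Int) :=
  bl.filter (fun l => l.2 == y)

-- the x-coordinates of the y-group: A's 'x_loc', B's 'xs_by_y[y]'
def xsOf (bl : List (Int × Int)) (y : Int) : List Int :=
  (foundOf bl y).map (·.1)

-- the contribution of the group of y to the front part (in chronological order) / to the back part
def cFront (bl : List (Int × Int)) (rows y : Int) : List Int :=
  if (xsOf bl y).length == 1 then
    [pyIndexI bl (PySem.List.pyGetD (xsOf bl y) 0 0, y)]
  else if (PySem.List.min? (xsOf bl y) (fun x => x)).getD 0 >
          rows - (PySem.List.max? (xsOf bl y) (fun x => x)).getD 0 - 1 then []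
  else (PySem.List.sorted (xsOf bl y) (fun x => x) false).map (fun x => pyIndexI bl (x, y))

def cBack (bl : List (Int × Int)) (rows y : Int) : List Int :=
  if (xsOf bl y).length == 1 then []
  else if (PySem.List.min? (xsOf bl y) (fun x => x)).getD 0 >
          rows - (PySem.List.max? (xsOf bl y) (fun x => x)).getD 0 - 1 then
    (PySem.List.sorted (xsOf bl y) (fun x => x) true).map (fun x => pyIndexI bl (x, y))
  else []

-- B's per-group block and front test
def blockOf (bl : List (Int × Int)) (y : Int) : List Int :=
  (PySem.List.sorted (xsOf bl y) (fun x => x) true).map (fun x => pyIndexI bl (x, y))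

def frontP (bl : List (Int × Int)) (rows y : Int) : Bool :=
  (xsOf bl y).length == 1 ||
    decide ((PySem.List.min? (xsOf bl y) (fun x => x)).getD 0 ≤
            rows - (PySem.List.max? (xsOf bl y) (fun x => x)).getD 0 - 1)

-- every member of the y-group has second component y
lemma snd_of_mem_foundOf {bl : List (Int × Int)} {y : Int} {l : Int × Int}
    (h : l ∈ foundOf bl y) : l.2 = y := by
  have := List.of_mem_filter h
  simpa using this

-- A's inner 'for loc in found: if loc[0] == x: …; break' finds exactly (x, y)
lemma find_fst_eq (fd : List (Int × Int)) (y x : Int)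
    (hy : ∀ l ∈ fd, l.2 = y) (hx : x ∈ fd.map (·.1)) :
    fd.find? (fun l => l.1 == x) = some (x, y) := by
  induction fd with
  | nil => simp at hx
  | cons l t ih =>
    by_cases h : l.1 = x
    · have hl2 : l.2 = y := hy l (List.mem_cons_self)
      have : l = (x, y) := by
        cases l; simp_all
      simp [this]
    · have hx' : x ∈ t.map (·.1) := by
        rcases List.mem_map.mp hx with ⟨m, hm, hfst⟩
        rcases List.mem_cons.mp hm with rfl | hm'
        · exact absurd hfst h
        · exact List.mem_map.mpr ⟨m, hm', hfst⟩
      have := ih (fun l hl => hy l (List.mem_cons_of_mem _ hl)) hx'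
      simpa [List.find?_cons, h] using this

lemma find_fst_eq_of_mem_xs {bl : List (Int × Int)} {y x : Int} (hx : x ∈ xsOf bl y) :
    (foundOf bl y).find? (fun l => l.1 == x) = some (x, y) :=
  find_fst_eq _ y x (fun _ hl => snd_of_mem_foundOf hl) hx

-- A's per-y loop body, after the found/x_loc scans are characterised
lemma stepA_eq (bl : List (Int × Int)) (rows : Int) (y : Int) (s : List Int) :
    (let found : List (Int × Int) :=
      (PySem.List.pyRange 0 (bl.length : Int) 1).foldl
        (fun f i => if (PySem.List.pyGetD bl i (0, 0)).2 == y
                    then f ++ [PySem.List.pyGetD bl i (0, 0)] else f) []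
    if found.length == 1 then
      PySem.List.insert s 0 (pyIndexI bl (PySem.List.pyGetD found 0 (0, 0)))
    else
      let x_loc := found.foldl (fun a loc => a ++ [loc.1]) []
      let up := (PySem.List.min? x_loc (fun x => x)).getD 0
      let down := rows - (PySem.List.max? x_loc (fun x => x)).getD 0 - 1
      if up > down then
        (PySem.List.sorted x_loc (fun x => x) true).foldl (fun acc x =>
          match found.find? (fun loc => loc.1 == x) with
          | some loc => acc ++ [pyIndexI bl loc]
          | none => acc) s
      else
        (PySem.List.sorted x_loc (fun x => x) false).foldl (fun acc x =>
          match found.find? (fun loc => loc.1 == x) with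
          | some loc => PySem.List.insert acc 0 (pyIndexI bl loc)
          | none => acc) s)
    = (cFront bl rows y).reverse ++ s ++ cBack bl rows y := by
  have hfound : (PySem.List.pyRange 0 (bl.length : Int) 1).foldl
      (fun f i => if (PySem.List.pyGetD bl i (0, 0)).2 == y
                  then f ++ [PySem.List.pyGetD bl i (0, 0)] else f) [] = foundOf bl y := by
    rw [PySem.List.foldl_pyRange_zero_pyGetD' bl (0, 0)
          (fun f (loc : Int × Int) => if loc.2 == y then f ++ [loc] else f) []]
    simpa [foundOf] using PySem.List.foldl_append_if_eq_filter (fun (l : Int × Int) => l.2 == y) bl []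
  simp only [hfound]
  have hx : (foundOf bl y).foldl (fun a loc => a ++ [loc.1]) [] = xsOf bl y := by
    simpa [xsOf] using PySem.List.foldl_append_singleton_eq_map (fun (l : Int × Int) => l.1) (foundOf bl y) []
  simp only [hx]
  have hlen_eq : (xsOf bl y).length = (foundOf bl y).length := by simp [xsOf]
  by_cases hlen : (foundOf bl y).length = 1
  · -- singleton group
    rcases List.length_eq_one_iff.mp hlen with ⟨l, hl⟩
    have hly : l.2 = y := snd_of_mem_foundOf (show l ∈ foundOf bl y by rw [hl]; exact List.mem_singleton_self l)
    have hxs : xsOf bl y = [l.1] := by simp [xsOf, hl]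
    have hc : cFront bl rows y = [pyIndexI bl l] := by
      unfold cFront
      rw [if_pos (by simp [hxs])]
      rw [hxs]
      have : (PySem.List.pyGetD [l.1] 0 0, y) = l := by
        cases l with
        | mk a b => simp_all [PySem.List.pyGetD, PySem.List.pyGet?, PySem.List.pyIdx?]
      rw [this]
    have hb : cBack bl rows y = [] := by
      unfold cBack
      rw [if_pos (by simp [hxs])]
    rw [if_pos (by simpa using hlen), hl, hc, hb]
    have : PySem.List.pyGetD [l] 0 (0, 0) = l := by
      simp [PySem.List.pyGetD, PySem.List.pyGet?, PySem.List.pyIdx?]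
    rw [this, PySem.List.insert_zero]
    simp
  · -- group with several entries (or, never here, length ≠ 1)
    rw [if_neg (by simpa using hlen)]
    have hne1 : ¬ ((xsOf bl y).length == 1) = true := by
      simp [hlen_eq]; omega
    by_cases hud : (PySem.List.min? (xsOf bl y) (fun x => x)).getD 0 >
        rows - (PySem.List.max? (xsOf bl y) (fun x => x)).getD 0 - 1
    · -- back branch: append in descending-x order
      rw [if_pos hud]
      have hc : cFront bl rows y = [] := by
        unfold cFront; rw [if_neg hne1, if_pos hud]
      have hb : cBack bl rows y
          = (PySem.List.sorted (xsOf bl y) (fun x => x) true).map (fun x => pyIndexI bl (x, y)) := by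
        unfold cBack; rw [if_neg hne1, if_pos hud]
      rw [hc, hb]
      rw [PySem.List.foldl_congr_mem (PySem.List.sorted (xsOf bl y) (fun x => x) true) _
            (fun acc x => acc ++ [pyIndexI bl (x, y)]) s
            (fun acc x hxm => by
              rw [find_fst_eq_of_mem_xs ((PySem.List.mem_sorted _ _ _ _).mp hxm)])]
      rw [PySem.List.foldl_append_singleton_eq_map]
      simp
    · -- front branch: prepend in ascending-x order
      rw [if_neg hud]
      have hc : cFront bl rows y
          = (PySem.List.sorted (xsOf bl y) (fun x => x) false).map (fun x => pyIndexI bl (x, y)) := by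
        unfold cFront; rw [if_neg hne1, if_neg hud]
      have hb : cBack bl rows y = [] := by
        unfold cBack; rw [if_neg hne1, if_neg hud]
      rw [hc, hb]
      rw [PySem.List.foldl_congr_mem (PySem.List.sorted (xsOf bl y) (fun x => x) false) _
            (fun acc x => pyIndexI bl (x, y) :: acc) s
            (fun acc x hxm => by
              rw [find_fst_eq_of_mem_xs ((PySem.List.mem_sorted _ _ _ _).mp hxm)]
              exact PySem.List.insert_zero acc (pyIndexI bl (x, y)))]
      rw [List.foldl_flip_cons_eq_append]
      simp

-- A's outer loop: prepends accumulate reversed at the front, appends at the back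
lemma foldA_inv (bl : List (Int × Int)) (rows : Int) (stepA : List Int → Int → List Int)
    (hstep : ∀ s y, stepA s y = (cFront bl rows y).reverse ++ s ++ cBack bl rows y) :
    ∀ (ys : List Int) (F B : List Int),
      ys.foldl stepA (F.reverse ++ B)
        = (F ++ ys.flatMap (cFront bl rows)).reverse ++ (B ++ ys.flatMap (cBack bl rows)) := by
  intro ys
  induction ys with
  | nil => intro F B; simp
  | cons y t ih =>
    intro F B
    have h1 : stepA (F.reverse ++ B) y
        = (F ++ cFront bl rows y).reverse ++ (B ++ cBack bl rows y) := by
      rw [hstep]; simp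
    simp only [List.foldl_cons, h1, ih (F ++ cFront bl rows y) (B ++ cBack bl rows y)]
    simp [List.flatMap_cons]

lemma A_eq (bl : List (Int × Int)) (rows : Int) :
    find_back_order bl rows
      = ((PySem.List.sorted (PySem.Set.ofList (bl.map (·.2))) (fun y => y) true).flatMap
          (cFront bl rows)).reverse
        ++ (PySem.List.sorted (PySem.Set.ofList (bl.map (·.2))) (fun y => y) true).flatMap
          (cBack bl rows) := by
  simp only [find_back_order]
  have hy : bl.foldl (fun s loc => PySem.Set.add s loc.2) PySem.Set.empty
      = PySem.Set.ofList (bl.map (·.2)) := by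
    rw [← PySem.Set.update_map_eq_foldl_add bl (fun l => l.2) PySem.Set.empty]
    exact PySem.Set.update_nil_left _
  rw [hy]
  simpa using foldA_inv bl rows _ (fun s y => stepA_eq bl rows y s)
    (PySem.List.sorted (PySem.Set.ofList (bl.map (·.2))) (fun y => y) true) [] []

-- the setdefault loop over enumerate is first-occurrence indexing
lemma setdefault_fold_get? (bl : List (Int × Int)) :
    ∀ (s : Int) (d : PySem.Dict (Int × Int) Int) (k : Int × Int),
      ((PySem.List.enumerate bl s).foldl
          (fun d (p : Int × (Int × Int)) => d.setdefault p.2 p.1) d).get? k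
        = ((d.get? k).or ((PySem.List.index? bl k).map (fun j => s + (j : Int)))) := by
  induction bl with
  | nil => intro s d k; simp [PySem.List.enumerate_nil]
  | cons x t ih =>
    intro s d k
    rw [PySem.List.enumerate_cons]
    simp only [List.foldl_cons]
    rw [ih (s + 1) (d.setdefault x s) k]
    by_cases hk : k = x
    · subst hk
      rw [PySem.Dict.get?_setdefault_self d k s]
      rw [PySem.List.index?_cons_self]
      cases hd : d.get? k with
      | none => simp
      | some v => simp
    · rw [PySem.Dict.get?_setdefault_of_ne d s hk]
      rw [PySem.List.index?_cons_of_ne t (Ne.symm hk)]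
      cases hd : d.get? k with
      | none =>
        cases hi : PySem.List.index? t k with
        | none => simp
        | some j =>
          simp only [Option.none_or, Option.map_some]
          simp
          ring
      | some v => simp

lemma first_getD (bl : List (Int × Int)) (k : Int × Int) :
    ((PySem.List.enumerate bl 0).foldl
        (fun d (p : Int × (Int × Int)) => d.setdefault p.2 p.1) PySem.Dict.empty).getD k 0
      = pyIndexI bl k := by
  rw [PySem.Dict.getD_eq_get?_getD, setdefault_fold_get? bl 0 PySem.Dict.empty k]
  rw [PySem.Dict.get?_empty]
  simp only [Option.none_or]
  unfold pyIndexI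
  cases h : PySem.List.index? bl k with
  | none => simp
  | some j => simp

-- the grouping loop yields the per-y x-lists
lemma enumerate_map_swap (bl : List (Int × Int)) :
    (PySem.List.enumerate bl 0).map (fun (p : Int × (Int × Int)) => (p.2.2, p.2.1))
      = bl.map (fun e => (e.2, e.1)) := by
  rw [show (fun (p : Int × (Int × Int)) => (p.2.2, p.2.1))
        = (fun (e : Int × Int) => (e.2, e.1)) ∘ (fun p => p.2) from rfl,
      ← List.map_map, PySem.List.map_snd_enumerate]

lemma groups_getD (bl : List (Int × Int)) (y : Int) :
    ((PySem.List.enumerate bl 0).foldl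
        (fun d (p : Int × (Int × Int)) => d.modify p.2.2 [] (· ++ [p.2.1])) PySem.Dict.empty).getD y []
      = xsOf bl y := by
  have h : (PySem.List.enumerate bl 0).foldl
        (fun d (p : Int × (Int × Int)) => d.modify p.2.2 [] (· ++ [p.2.1])) PySem.Dict.empty
      = ((PySem.List.enumerate bl 0).map (fun p => (p.2.2, p.2.1))).foldl
        (fun d (q : Int × Int) => d.modify q.1 [] (· ++ [q.2])) PySem.Dict.empty := by
    rw [List.foldl_map]
  rw [h, PySem.Dict.getD_foldl_modify_append, enumerate_map_swap]
  simp only [xsOf, foundOf, List.filter_map, List.map_map]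
  rfl

lemma groups_keys (bl : List (Int × Int)) :
    ((PySem.List.enumerate bl 0).foldl
        (fun d (p : Int × (Int × Int)) => d.modify p.2.2 [] (· ++ [p.2.1])) PySem.Dict.empty).keys
      = PySem.Set.ofList (bl.map (·.2)) := by
  rw [PySem.Dict.keys_foldl_modify_key (PySem.List.enumerate bl 0) (fun p => p.2.2) []
        (fun _ p => (· ++ [p.2.1])) PySem.Dict.empty]
  rw [show (PySem.Dict.empty : PySem.Dict Int (List Int)).keys = [] from rfl,
      PySem.Set.update_nil_left]
  rw [show (fun (p : Int × (Int × Int)) => p.2.2) = (fun (e : Int × Int) => e.2) ∘ (fun p => p.2) from rfl,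
      ← List.map_map, PySem.List.map_snd_enumerate]

-- B's recursion, under pointwise descriptions of the two dicts
lemma build_eq (bl : List (Int × Int)) (rows : Int)
    (groups : PySem.Dict Int (List Int)) (first : PySem.Dict (Int × Int) Int)
    (hg : ∀ y, groups.getD y [] = xsOf bl y)
    (hf : ∀ k, first.getD k 0 = pyIndexI bl k) :
    ∀ ys, fbo_build groups first rows ys
      = (ys.filter (frontP bl rows)).flatMap (blockOf bl)
        ++ ((ys.filter (fun y => !frontP bl rows y)).reverse).flatMap (blockOf bl) := by
  intro ys
  induction ys with
  | nil => simp [fbo_build]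
  | cons y t ih =>
    simp only [fbo_build, hg, hf]
    by_cases hfr : frontP bl rows y = true
    · rw [if_pos (by simpa [frontP] using hfr)]
      simp [List.filter_cons, hfr, ih, blockOf]
    · rw [if_neg (by simpa [frontP] using hfr)]
      simp [List.filter_cons, hfr, ih, blockOf]

-- descending sort of Ints is the reverse of the ascending sort
lemma sorted_rev_eq_reverse (xs : List Int) :
    PySem.List.sorted xs (fun x => x) true
      = (PySem.List.sorted xs (fun x => x) false).reverse := by
  refine List.Perm.eq_of_pairwise (le := fun a b : Int => b ≤ a)
    (fun a b _ _ h1 h2 => le_antisymm h2 h1) ?_ ?_ ?_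
  · exact PySem.List.sorted_pairwise_rev xs (fun x => x)
  · exact (List.pairwise_reverse).mpr (by
      simpa using PySem.List.sorted_pairwise xs (fun x => x))
  · exact (PySem.List.sorted_perm xs (fun x => x) true).trans
      ((PySem.List.sorted_perm xs (fun x => x) false).symm.trans
        (List.reverse_perm _).symm)

-- the descending y list A iterates is the reverse of the ascending one B iterates
lemma ysort_rev (bl : List (Int × Int)) :
    PySem.List.sorted (PySem.Set.ofList (bl.map (·.2))) (fun y => y) true
      = (PySem.List.sorted (PySem.Set.ofList (bl.map (·.2))) (fun y => y) false).reverse := by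
  refine PySem.List.sorted_rev_eq_of_perm_of_pairwise_gt _ _ (fun y : Int => y) ?_ ?_
  · exact (List.reverse_perm _).trans (PySem.List.sorted_perm _ _ _)
  · exact (List.pairwise_reverse).mpr (by
      simpa using PySem.List.sorted_ofList_pairwise_lt (bl.map (·.2)))

-- cFront / cBack against B's uniform block, by the front test
lemma cFront_of_front {bl : List (Int × Int)} {rows y : Int}
    (h : frontP bl rows y = true) :
    (cFront bl rows y).reverse = blockOf bl y ∧ cBack bl rows y = [] := by
  by_cases h1 : ((xsOf bl y).length == 1) = true
  · rcases List.length_eq_one_iff.mp (by simpa using h1) with ⟨x, hxs⟩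
    constructor
    · unfold cFront blockOf
      rw [if_pos h1, hxs]
      have hs : PySem.List.sorted [x] (fun x => x) true = [x] := rfl
      rw [hs]
      simp [PySem.List.pyGetD, PySem.List.pyGet?, PySem.List.pyIdx?]
    · unfold cBack; rw [if_pos h1]
  · have h2 : ¬ (PySem.List.min? (xsOf bl y) (fun x => x)).getD 0 >
        rows - (PySem.List.max? (xsOf bl y) (fun x => x)).getD 0 - 1 := by
      simp only [frontP, h1, Bool.false_or, decide_eq_true_eq] at h
      omega
    constructor
    · unfold cFront blockOf
      rw [if_neg h1, if_neg h2, sorted_rev_eq_reverse, ← List.map_reverse]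
    · unfold cBack; rw [if_neg h1, if_neg h2]

lemma cBack_of_back {bl : List (Int × Int)} {rows y : Int}
    (h : frontP bl rows y = false) :
    cFront bl rows y = [] ∧ cBack bl rows y = blockOf bl y := by
  have h1 : ¬ ((xsOf bl y).length == 1) = true := by
    intro hc; simp [frontP, hc] at h
  have h2 : (PySem.List.min? (xsOf bl y) (fun x => x)).getD 0 >
      rows - (PySem.List.max? (xsOf bl y) (fun x => x)).getD 0 - 1 := by
    simp only [frontP, h1, Bool.false_or, decide_eq_true_eq] at h ⊢
    simp only [Bool.or_eq_false_iff, decide_eq_false_iff_not] at h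
    omega
  constructor
  · unfold cFront; rw [if_neg h1, if_pos h2]
  · unfold cBack blockOf; rw [if_neg h1, if_pos h2]

-- a flatMap that is empty off p restricts to the p-filter
lemma flatMap_filter_of_empty {α : Type} (p : α → Bool) (f g : α → List Int)
    (hmatch : ∀ a, p a = true → f a = g a) (hnil : ∀ a, p a = false → f a = []) :
    ∀ l : List α, l.flatMap f = (l.filter p).flatMap g := by
  intro l
  induction l with
  | nil => simp
  | cons a t ih =>
    cases hp : p a with
    | true => simp [List.filter_cons, hp, hmatch a hp, ih]
    | false => simp [List.filter_cons, hp, hnil a hp, ih]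

lemma B_eq (bl : List (Int × Int)) (rows : Int) :
    find_back_order_alt bl rows
      = ((PySem.List.sorted (PySem.Set.ofList (bl.map (·.2))) (fun y => y) true).flatMap
          (cFront bl rows)).reverse
        ++ (PySem.List.sorted (PySem.Set.ofList (bl.map (·.2))) (fun y => y) true).flatMap
          (cBack bl rows) := by
  simp only [find_back_order_alt]
  rw [PySem.List.foldl_prod_mk
        (f := fun (d : PySem.Dict Int (List Int)) (p : Int × (Int × Int)) => d.modify p.2.2 [] (· ++ [p.2.1]))
        (g := fun (d : PySem.Dict (Int × Int) Int) (p : Int × (Int × Int)) => d.setdefault p.2 p.1)]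
  rw [groups_keys]
  rw [build_eq bl rows _ _ (groups_getD bl) (first_getD bl)
        (PySem.List.sorted (PySem.Set.ofList (bl.map (·.2))) (fun y => y) false)]
  set ysA := PySem.List.sorted (PySem.Set.ofList (bl.map (·.2))) (fun y => y) false with hysA
  rw [ysort_rev]
  -- front part
  have hF : (ysA.reverse.flatMap (cFront bl rows)).reverse
      = (ysA.filter (frontP bl rows)).flatMap (blockOf bl) := by
    rw [List.reverse_flatMap, List.reverse_reverse]
    exact flatMap_filter_of_empty (frontP bl rows)
      (List.reverse ∘ cFront bl rows) (blockOf bl)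
      (fun y hy => (cFront_of_front hy).1)
      (fun y hy => by simp [Function.comp, (cBack_of_back hy).1]) ysA
  -- back part
  have hB : ysA.reverse.flatMap (cBack bl rows)
      = ((ysA.filter (fun y => !frontP bl rows y)).reverse).flatMap (blockOf bl) := by
    rw [flatMap_filter_of_empty (fun y => !frontP bl rows y)
      (cBack bl rows) (blockOf bl)
      (fun y hy => (cBack_of_back (by simpa using hy)).2)
      (fun y hy => (cFront_of_front (by simpa using hy)).2) ysA.reverse]
    rw [List.filter_reverse]
  rw [hF, hB]

-- ===== VERDICT (by name: the statement is the Claim_ definition above) =====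
theorem find_back_order_spec : Claim_equal_find_back_order := by
  intro back_loc rows _
  unfold Spec_find_back_order
  rw [A_eq, B_eq]
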